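-- pv_equiv track=rewrite | github.com/BreakTheFakeGIT/eutest | tests_async_llm/eu_experiments_text copy.py | filter_sentences_with_indices
-- ===== SOURCE A (Python) =====
-- def filter_sentences_with_indices(sentences, target_words):
--     start_index = None
--     last_excluded_index = None
--     result = []
--
--     # Step 1: Find the first index where any target word appears
--     for i, sentence in enumerate(sentences):
--         if any(word in sentence.split() for word in target_words):
--             start_index = i
--             break
--
--     if start_index is None:
--         return [], None, None
--
--     # Step 2: Iterate from start_index and exclude sentences with target words
--     for i in range(start_index, len(sentences)):
--         sentence = sentences[i]
--         if any(word in sentence.split() for word in target_words):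
--             last_excluded_index = i
--             continue
--         result.append(sentence)
--
--     return result, start_index, last_excluded_index
-- ===== SOURCE B (Python) =====
-- def filter_sentences_with_indices(sentences, target_words):
--     # Build the full table of excluded positions first, then derive everything from it.
--     excluded = [i for i, s in enumerate(sentences)
--                 if any(w in s.split() for w in target_words)]
--     if not excluded:
--         return [], None, None
--     start_index = excluded[0]
--     excluded_set = set(excluded)
--     result = [sentences[i] for i in range(start_index, len(sentences))
--               if i not in excluded_set]
--     return result, start_index, excluded[-1]
-- ===== Notes on version B (the rewrite author's own statement) =====
-- stated objective: alternative
-- what changed: A finds the first hit with a break and then rescans re-splitting each sentence; B materializes the full table of excluded indices once, derives start/last as its first and last entries, and rebuilds the result by index against a set of excluded positions, splitting each sentence exactly once.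
import Mathlib
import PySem

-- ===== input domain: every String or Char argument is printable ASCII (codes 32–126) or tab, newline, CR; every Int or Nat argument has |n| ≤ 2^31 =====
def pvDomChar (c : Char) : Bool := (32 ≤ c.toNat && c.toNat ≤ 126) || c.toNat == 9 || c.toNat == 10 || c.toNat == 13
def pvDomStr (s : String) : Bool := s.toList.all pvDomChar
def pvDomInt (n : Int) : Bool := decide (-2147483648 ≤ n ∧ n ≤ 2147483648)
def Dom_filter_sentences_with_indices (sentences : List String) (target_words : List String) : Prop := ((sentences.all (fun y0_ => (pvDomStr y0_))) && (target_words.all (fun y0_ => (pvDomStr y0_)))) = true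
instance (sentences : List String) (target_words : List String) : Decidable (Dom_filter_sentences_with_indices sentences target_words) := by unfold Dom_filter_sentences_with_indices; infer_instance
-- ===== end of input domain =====

-- B builds the table of excluded indices once and derives start/last/result from it,
-- instead of A's find-first-with-break followed by a second re-splitting scan (objective: alternative).

-- ===== PORT A =====
-- any(word in sentence.split() for word in target_words)  (shared by both Pythons verbatim)
def pvExcl (target_words : List String) (sentence : String) : Bool :=
  target_words.any (fun word => (PySem.Str.split₀ sentence).contains word)

-- A's first loop: for i, sentence in enumerate(sentences): if …: start_index = i; break
def pvFindStart (target_words : List String) : List (Int × String) → Option Int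
  | [] => none
  | (i, s) :: rest => if pvExcl target_words s then some i else pvFindStart target_words rest

def filter_sentences_with_indices (sentences : List String) (target_words : List String) :
    List String × Option Int × Option Int :=
  match pvFindStart target_words (PySem.List.enumerate sentences 0) with
  | none => ([], none, none)
  | some start_index =>
    -- for i in range(start_index, len(sentences)): …  (sentences[i] is always in range here,
    -- so pyGetD with default "" is exact)
    let st := (PySem.List.pyRange start_index (sentences.length : Int) 1).foldl
      (fun (st : Option Int × List String) i =>
        let sentence := PySem.List.pyGetD sentences i ""
        if pvExcl target_words sentence then (some i, st.2) else (st.1, st.2 ++ [sentence]))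
      (none, ([] : List String))
    (st.2, some start_index, st.1)

-- ===== PORT B =====
def filter_sentences_with_indices_alt (sentences : List String) (target_words : List String) :
    List String × Option Int × Option Int :=
  -- excluded = [i for i, s in enumerate(sentences) if any(w in s.split() for w in target_words)]
  let excluded : List Int :=
    ((PySem.List.enumerate sentences 0).filter (fun pr => pvExcl target_words pr.2)).map
      (fun pr => pr.1)
  match excluded with
  | [] => ([], none, none)
  | e0 :: _ =>
    let exSet : PySem.Set Int := PySem.Set.ofList excluded
    -- result = [sentences[i] for i in range(start_index, len(sentences)) if i not in excluded_set]
    let result := ((PySem.List.pyRange e0 (sentences.length : Int) 1).filter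
        (fun i => !(PySem.Set.contains exSet i))).map
      (fun i => PySem.List.pyGetD sentences i "")
    (result, some e0, some ((excluded.getLast?).getD 0))

-- ===== PRECONDITION & SPEC =====
def Spec_filter_sentences_with_indices (sentences : List String) (target_words : List String) (out : List String × Option Int × Option Int) : Prop := out = filter_sentences_with_indices_alt sentences target_words
instance (sentences : List String) (target_words : List String) (out : List String × Option Int × Option Int) : Decidable (Spec_filter_sentences_with_indices sentences target_words out) := by unfold Spec_filter_sentences_with_indices; infer_instance

-- ===== CLAIM (what is proved, stated in full; the proofs are below) =====
def Claim_equal_filter_sentences_with_indices : Prop := ∀ (sentences : List String) (target_words : List String), Dom_filter_sentences_with_indices sentences target_words → Spec_filter_sentences_with_indices sentences target_words (filter_sentences_with_indices sentences target_words)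

-- ===== LEMMAS AND PROOFS =====

-- getLast? of a cons, folded through Option.or
theorem pvOrLast {α : Type} (l : List α) (a : α) (l0 : Option α) :
    (a :: l).getLast?.or l0 = l.getLast?.or (some a) := by
  cases l with
  | nil => simp
  | cons b bs =>
    rw [List.getLast?_cons_cons]
    cases hL : (b :: bs).getLast? with
    | none => simp [List.getLast?_eq_none_iff] at hL
    | some v => simp

-- A's break-loop returns the head of B's excluded table.
theorem pvFindStart_eq_head (tw : List String) (xs : List String) (s : Int) :
    pvFindStart tw (PySem.List.enumerate xs s) =
      (((PySem.List.enumerate xs s).filter (fun pr => pvExcl tw pr.2)).map (fun pr => pr.1)).head? := by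
  induction xs generalizing s with
  | nil => simp [pvFindStart, PySem.List.enumerate_nil]
  | cons x xs ih =>
    rw [PySem.List.enumerate_cons]
    by_cases h : pvExcl tw x
    · simp [pvFindStart, h]
    · simp [pvFindStart, h, ih]

-- B's excluded table as a filtered range of indices.
theorem pvExcluded_eq_range_filter (tw : List String) (xs : List String) :
    ((PySem.List.enumerate xs 0).filter (fun pr => pvExcl tw pr.2)).map (fun pr => pr.1) =
      (PySem.List.pyRange 0 (xs.length : Int) 1).filter
        (fun i => pvExcl tw (PySem.List.pyGetD xs i "")) := by
  rw [PySem.List.enumerate_eq_map_pyRange xs ""]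
  rw [List.filter_map, List.map_map]
  simp [Function.comp_def]

-- A's step-2 fold, characterised: last excluded index and collected sentences.
theorem pvFoldA (tw : List String) (xs : List String) (ix : List Int)
    (l0 : Option Int) (r0 : List String) :
    ix.foldl
      (fun (st : Option Int × List String) i =>
        if pvExcl tw (PySem.List.pyGetD xs i "") then (some i, st.2)
        else (st.1, st.2 ++ [PySem.List.pyGetD xs i ""]))
      (l0, r0) =
    (Option.or ((ix.filter (fun i => pvExcl tw (PySem.List.pyGetD xs i ""))).getLast?) l0,
     r0 ++ (ix.filter (fun i => !(pvExcl tw (PySem.List.pyGetD xs i "")))).map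
        (fun i => PySem.List.pyGetD xs i "")) := by
  induction ix generalizing l0 r0 with
  | nil => simp
  | cons i ix ih =>
    simp only [List.foldl_cons]
    by_cases h : pvExcl tw (PySem.List.pyGetD xs i "") = true
    · rw [if_pos h, ih, List.filter_cons, List.filter_cons]
      simp [h, pvOrLast]
    · rw [if_neg h, ih, List.filter_cons, List.filter_cons]
      simp [h, List.append_assoc]

-- ===== VERDICT (by name: the statement is the Claim_ definition above) =====
theorem filter_sentences_with_indices_spec : Claim_equal_filter_sentences_with_indices := by
  intro sentences target_words _
  unfold Spec_filter_sentences_with_indices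
  unfold filter_sentences_with_indices filter_sentences_with_indices_alt
  rw [pvFindStart_eq_head, pvExcluded_eq_range_filter]
  set n : Int := (sentences.length : Int) with hn
  set p : Int → Bool := fun i => pvExcl target_words (PySem.List.pyGetD sentences i "") with hp
  cases hE : (PySem.List.pyRange 0 n 1).filter p with
  | nil => simp
  | cons e0 t =>
    have he0mem : e0 ∈ (PySem.List.pyRange 0 n 1).filter p := by rw [hE]; exact List.mem_cons_self
    have he0range : e0 ∈ PySem.List.pyRange 0 n 1 := (List.mem_filter.mp he0mem).1
    have he0b : 0 ≤ e0 ∧ e0 < n := (PySem.List.mem_pyRange_one).mp he0range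
    have hsplit : PySem.List.pyRange 0 n 1 =
        PySem.List.pyRange 0 e0 1 ++ PySem.List.pyRange e0 n 1 :=
      PySem.List.pyRange_one_append 0 e0 n he0b.1 (le_of_lt he0b.2)
    -- nothing before e0 is excluded
    have hpre : (PySem.List.pyRange 0 e0 1).filter p = [] := by
      cases hpf : (PySem.List.pyRange 0 e0 1).filter p with
      | nil => rfl
      | cons y ys =>
        exfalso
        have hy : y ∈ (PySem.List.pyRange 0 e0 1).filter p := by rw [hpf]; exact List.mem_cons_self
        have hylt : y < e0 := ((PySem.List.mem_pyRange_one).mp (List.mem_filter.mp hy).1).2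
        have hcat : (PySem.List.pyRange 0 n 1).filter p =
            y :: (ys ++ (PySem.List.pyRange e0 n 1).filter p) := by
          rw [hsplit, List.filter_append, hpf]; simp
        rw [hE] at hcat
        have : e0 = y := by injection hcat
        omega
    have hEtail : (PySem.List.pyRange e0 n 1).filter p = e0 :: t := by
      rw [hsplit, List.filter_append, hpre] at hE; simpa using hE
    -- membership in the excluded set ↔ p, on the tail range
    have hmem : ∀ i ∈ PySem.List.pyRange e0 n 1,
        (PySem.Set.contains (PySem.Set.ofList (e0 :: t)) i) = p i := by
      intro i hi
      rw [← hEtail]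
      have hib := (PySem.List.mem_pyRange_one).mp hi
      by_cases hpi : p i = true
      · rw [hpi]
        exact (PySem.Set.contains_iff _ _).mpr ((PySem.Set.mem_ofList _ _).mpr
          (List.mem_filter.mpr ⟨hi, hpi⟩))
      · have hnot : i ∉ (PySem.List.pyRange e0 n 1).filter p := by
          intro hmem'
          exact hpi (List.mem_filter.mp hmem').2
        have hc : ¬ (PySem.Set.contains (PySem.Set.ofList ((PySem.List.pyRange e0 n 1).filter p)) i = true) := by
          intro hc
          exact hnot ((PySem.Set.mem_ofList _ _).mp ((PySem.Set.contains_iff _ _).mp hc))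
        simp only [Bool.not_eq_true] at hc hpi
        rw [hc, hpi]
    have hfilt : (PySem.List.pyRange e0 n 1).filter
          (fun i => !(PySem.Set.contains (PySem.Set.ofList (e0 :: t)) i)) =
        (PySem.List.pyRange e0 n 1).filter (fun i => !(p i)) :=
      List.filter_congr (fun i hi => by rw [hmem i hi])
    simp only [List.head?_cons]
    rw [pvFoldA, hEtail, hfilt]
    simp only [Prod.mk.injEq]
    refine ⟨by simp only [hp, List.nil_append], trivial, ?_⟩
    cases hL : (e0 :: t).getLast? with
    | none => simp [List.getLast?_eq_none_iff] at hL
    | some v => simp [Option.or]
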